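-- pv_equiv track=rewrite | github.com/retardedjames/redbot-cogs | gofast/challenges.py | _has_three_vowels_in_row
-- ===== SOURCE A (Python) =====
-- _VOWELS = set("aeiou")
--
-- def _has_three_vowels_in_row(word: str) -> bool:
--     count = 0
--     for ch in word:
--         if ch in _VOWELS:
--             count += 1
--             if count >= 3:
--                 return True
--         else:
--             count = 0
--     return False
-- ===== SOURCE B (Python) =====
-- _VOWELS = set("aeiou")
--
-- def _has_three_vowels_in_row(word: str) -> bool:
--     # sliding-window test: check each length-3 window of start positions independently
--     for i in range(len(word) - 2):
--         if word[i] in _VOWELS and word[i + 1] in _VOWELS and word[i + 2] in _VOWELS: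
--             return True
--     return False
-- ===== Notes on version B (the rewrite author's own statement) =====
-- stated objective: idiomatic
-- what changed: Replaced A's running-counter scan (reset on each consonant) by an index-window test: each start position i is checked independently for three vowels at i, i+1, i+2; no counter state is maintained.
import Mathlib
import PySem

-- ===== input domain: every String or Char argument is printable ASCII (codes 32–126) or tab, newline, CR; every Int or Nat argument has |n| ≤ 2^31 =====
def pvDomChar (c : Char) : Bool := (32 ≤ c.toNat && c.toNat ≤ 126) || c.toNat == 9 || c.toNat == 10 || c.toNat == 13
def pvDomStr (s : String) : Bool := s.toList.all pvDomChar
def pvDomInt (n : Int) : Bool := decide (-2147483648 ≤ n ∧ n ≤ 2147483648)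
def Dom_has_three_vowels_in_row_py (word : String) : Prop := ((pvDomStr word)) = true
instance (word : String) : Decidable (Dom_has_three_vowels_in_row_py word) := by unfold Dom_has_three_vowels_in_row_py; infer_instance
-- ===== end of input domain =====

-- B replaces A's running-counter scan by an independent length-3 window test per start index (idiomatic; same cost).

-- ===== PORT A =====
-- 'ch in _VOWELS' (set membership)
def pvIsVowel (c : Char) : Bool := ['a', 'e', 'i', 'o', 'u'].contains c

-- A's loop: running counter, reset on non-vowel, early return at 3
def pvGoA : List Char → Nat → Bool
  | [], _ => false
  | c :: cs, count =>
    if pvIsVowel c then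
      if count + 1 ≥ 3 then true else pvGoA cs (count + 1)
    else
      pvGoA cs 0

def has_three_vowels_in_row_py (word : String) : Bool := pvGoA word.toList 0

-- ===== PORT B =====
-- Source B: for i in range(len(word)-2): if word[i],word[i+1],word[i+2] all vowels: True; else False.
-- Every index i+j taken is in range (i < len-2), so word[i+j] is cs.getD (i+j) ' ' exactly.
def has_three_vowels_in_row_py_alt (word : String) : Bool :=
  let cs := word.toList
  (List.range (cs.length - 2)).any fun i =>
    pvIsVowel (cs.getD i ' ') && pvIsVowel (cs.getD (i + 1) ' ') && pvIsVowel (cs.getD (i + 2) ' ')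

-- ===== PRECONDITION & SPEC =====
def Spec_has_three_vowels_in_row_py (word : String) (out : Bool) : Prop := out = has_three_vowels_in_row_py_alt word
instance (word : String) (out : Bool) : Decidable (Spec_has_three_vowels_in_row_py word out) := by unfold Spec_has_three_vowels_in_row_py; infer_instance

-- ===== CLAIM (what is proved, stated in full; the proofs are below) =====
def Claim_equal_has_three_vowels_in_row_py : Prop := ∀ (word : String), Dom_has_three_vowels_in_row_py word → Spec_has_three_vowels_in_row_py word (has_three_vowels_in_row_py word)

-- ===== LEMMAS AND PROOFS =====

-- "a length-3 all-vowel window starts somewhere in l"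
def pvWin (l : List Char) : Prop :=
  ∃ i, i + 2 < l.length ∧ pvIsVowel (l.getD i ' ') = true ∧
    pvIsVowel (l.getD (i + 1) ' ') = true ∧ pvIsVowel (l.getD (i + 2) ' ') = true

-- "the first n characters of l exist and are vowels"
def pvPref (l : List Char) (n : Nat) : Prop :=
  n ≤ l.length ∧ ∀ j < n, pvIsVowel (l.getD j ' ') = true

theorem pvPref_mono {l : List Char} {m n : Nat} (h : m ≤ n) : pvPref l n → pvPref l m :=
  fun ⟨hl, hv⟩ => ⟨le_trans h hl, fun j hj => hv j (lt_of_lt_of_le hj h)⟩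

theorem pvPref_three_win (l : List Char) (h : pvPref l 3) : pvWin l := by
  obtain ⟨hlen, hv⟩ := h
  exact ⟨0, by omega, hv 0 (by omega), hv 1 (by omega), hv 2 (by omega)⟩

theorem pvWin_cons (c : Char) (cs : List Char) :
    pvWin (c :: cs) ↔ (pvPref (c :: cs) 3 ∨ pvWin cs) := by
  constructor
  · rintro ⟨i, hlen, h0, h1, h2⟩
    cases i with
    | zero =>
      refine Or.inl ⟨by simpa using hlen, ?_⟩
      intro j hj
      interval_cases j
      · exact h0
      · exact h1
      · exact h2
    | succ i =>
      exact Or.inr ⟨i, by simpa using hlen, by simpa using h0, by simpa using h1,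
        by simpa using h2⟩
  · rintro (⟨hlen, hv⟩ | ⟨i, hlen, h0, h1, h2⟩)
    · exact ⟨0, by omega, hv 0 (by omega), hv 1 (by omega), hv 2 (by omega)⟩
    · exact ⟨i + 1, by simpa using hlen, by simpa using h0, by simpa using h1,
        by simpa using h2⟩

theorem pvPref_cons (c : Char) (cs : List Char) (n : Nat) (hc : pvIsVowel c = true) :
    pvPref (c :: cs) (n + 1) ↔ pvPref cs n := by
  constructor
  · rintro ⟨hlen, hv⟩
    refine ⟨by simpa using hlen, fun j hj => ?_⟩
    simpa using hv (j + 1) (by omega)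
  · rintro ⟨hlen, hv⟩
    refine ⟨by simpa using hlen, fun j hj => ?_⟩
    cases j with
    | zero => simpa using hc
    | succ j => simpa using hv j (by omega)

-- characterisation of A's counter loop
theorem pvGoA_iff (l : List Char) : ∀ count, count ≤ 2 →
    (pvGoA l count = true ↔ (pvPref l (3 - count) ∨ pvWin l)) := by
  induction l with
  | nil =>
    intro count hc
    simp only [pvGoA]
    constructor
    · intro h; cases h
    · rintro (⟨hlen, _⟩ | ⟨i, hlen, _⟩) <;> simp at hlen <;> omega
  | cons c cs ih =>
    intro count hc
    by_cases hv : pvIsVowel c = true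
    · by_cases h2 : count = 2
      · subst h2
        simp only [pvGoA, hv, if_true]
        constructor
        · intro _
          refine Or.inl ⟨by simp only [List.length_cons]; omega, fun j hj => ?_⟩
          interval_cases j
          simpa using hv
        · intro _; rfl
      · have hlt : count + 1 ≤ 2 := by omega
        have hstep : pvGoA (c :: cs) count = pvGoA cs (count + 1) := by
          simp only [pvGoA, hv, if_true]
          rw [if_neg (by omega)]
        rw [hstep, ih (count + 1) hlt, pvWin_cons]
        have hpref : pvPref (c :: cs) (3 - count) ↔ pvPref cs (3 - (count + 1)) := by
          have : 3 - count = (3 - (count + 1)) + 1 := by omega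
          rw [this, pvPref_cons c cs _ hv]
        constructor
        · rintro (hp | hw)
          · exact Or.inl (hpref.mpr hp)
          · exact Or.inr (Or.inr hw)
        · rintro (hp | (hw3 | hw))
          · exact Or.inl (hpref.mp hp)
          · exact Or.inl (hpref.mp (pvPref_mono (by omega) hw3))
          · exact Or.inr hw
    · have hstep : pvGoA (c :: cs) count = pvGoA cs 0 := by
        simp [pvGoA, hv]
      rw [hstep, ih 0 (by omega), pvWin_cons]
      constructor
      · rintro (hp | hw)
        · exact Or.inr (Or.inr (pvPref_three_win cs hp))
        · exact Or.inr (Or.inr hw)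
      · rintro (⟨hlen, hvv⟩ | (hw3 | hw))
        · exact absurd (by simpa using hvv 0 (by omega)) hv
        · exact absurd (by simpa using hw3.2 0 (by omega)) hv
        · exact Or.inr hw

-- B's value is exactly "some window exists"
theorem pvAlt_iff (word : String) :
    has_three_vowels_in_row_py_alt word = true ↔ pvWin word.toList := by
  unfold has_three_vowels_in_row_py_alt pvWin
  simp only [List.any_eq_true, List.mem_range, Bool.and_eq_true]
  constructor
  · rintro ⟨i, hi, ⟨h0, h1⟩, h2⟩
    exact ⟨i, by omega, h0, h1, h2⟩
  · rintro ⟨i, hi, h0, h1, h2⟩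
    exact ⟨i, by omega, ⟨h0, h1⟩, h2⟩

-- ===== VERDICT (by name: the statement is the Claim_ definition above) =====
theorem has_three_vowels_in_row_py_spec : Claim_equal_has_three_vowels_in_row_py := by
  intro word _
  unfold Spec_has_three_vowels_in_row_py has_three_vowels_in_row_py
  have hA := pvGoA_iff word.toList 0 (by omega)
  have hB := pvAlt_iff word
  rw [Bool.eq_iff_iff, hA, hB]
  constructor
  · rintro (hp | hw)
    · exact pvPref_three_win _ (by simpa using hp)
    · exact hw
  · exact Or.inr
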